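-- pv_equiv track=rewrite | github.com/Siegel-Lab/libSps | count_size.py | best_piv_dim
-- ===== SOURCE A (Python) =====
-- def best_piv_dim(points):
--     best_d = 0
--     split = 0
--     for d in range(len(points[0])):
--         s = len(set(p[d] for p in points))
--         if s > split:
--             split = s
--             best_d = d
--     return best_d
-- ===== SOURCE B (Python) =====
-- def best_piv_dim(points):
--     def distinct(col):
--         c, prev = 0, None
--         for v in sorted(col):
--             if v != prev:
--                 c += 1
--             prev = v
--         return c
--
--     width = len(points[0])
--     counts = [distinct(p[d] for p in points) for d in range(width)]
--     return max(range(width), key=counts.__getitem__, default=0)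
-- ===== Notes on version B (the rewrite author's own statement) =====
-- stated objective: alternative
-- what changed: Counts distinct values per dimension by sorting each column and counting value changes in one scan (sort-then-scan instead of building hash sets), stages the counts into a list, and picks the first-argmax dimension with the builtin max over range with a key, instead of A's fused running-best loop over set sizes.
import Mathlib
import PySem

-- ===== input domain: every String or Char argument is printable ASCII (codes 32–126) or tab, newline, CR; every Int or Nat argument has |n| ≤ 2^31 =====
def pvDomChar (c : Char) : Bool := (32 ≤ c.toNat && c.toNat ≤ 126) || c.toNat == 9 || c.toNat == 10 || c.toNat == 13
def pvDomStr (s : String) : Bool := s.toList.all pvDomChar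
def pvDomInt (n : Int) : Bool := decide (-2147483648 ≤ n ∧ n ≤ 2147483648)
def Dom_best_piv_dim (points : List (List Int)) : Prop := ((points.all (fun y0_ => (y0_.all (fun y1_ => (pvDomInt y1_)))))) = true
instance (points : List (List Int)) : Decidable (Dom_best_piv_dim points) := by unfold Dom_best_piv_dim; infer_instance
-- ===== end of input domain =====

-- B counts distinct values per dimension by sorting each column and counting value changes in one
-- scan (instead of A's hash sets), stages the counts into a list, and takes the first-argmax via
-- max(range(width), key=...) instead of A's fused running-best; RETURN-value equivalence only.

-- ===== PORT A =====
-- for d in range(len(points[0])): s = len(set(p[d] for p in points)); if s > split: …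
def best_piv_dim (points : List (List Int)) : Int :=
  (PySem.List.pyRange 0 ((points.headD []).length : Int) 1).foldl
    (fun (st : Int × Int) d =>
      let s : Int := (PySem.Set.ofList (points.map (fun p => PySem.List.pyGetD p d 0))).length
      if st.2 < s then (d, s) else st)
    (0, 0) |>.fst

-- ===== PORT B =====
-- def distinct(col): c, prev = 0, None; for v in sorted(col): if v != prev: c += 1; prev = v
def bpd_distinct (col : List Int) : Int :=
  ((PySem.List.sorted col (fun x => x) false).foldl
    (fun (st : Int × Option Int) v =>
      (if some v ≠ st.2 then st.1 + 1 else st.1, some v))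
    ((0 : Int), (none : Option Int))).1

-- counts = [distinct(p[d] for p in points) for d in range(width)]
-- return max(range(width), key=counts.__getitem__, default=0)
def best_piv_dim_alt (points : List (List Int)) : Int :=
  let width : Int := ((points.headD []).length : Int)
  let counts : List Int := (PySem.List.pyRange 0 width 1).map
      (fun d => bpd_distinct (points.map (fun p => PySem.List.pyGetD p d 0)))
  (PySem.List.max? (PySem.List.pyRange 0 width 1)
      (fun d => PySem.List.pyGetD counts d 0)).getD 0

-- ===== PRECONDITION & SPEC =====
-- A evaluates points[0] (IndexError on an empty list) and p[d] for every d below the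
-- width of the first point (IndexError when a later point is shorter), so Pre_ requires a
-- nonempty list whose every point has at least the first point's width.
def Pre_best_piv_dim (points : List (List Int)) : Prop :=
  points ≠ [] ∧ ∀ p ∈ points, (points.headD []).length ≤ p.length
instance (points : List (List Int)) : Decidable (Pre_best_piv_dim points) := by
  unfold Pre_best_piv_dim; infer_instance
def pvWitness_best_piv_dim : List (List Int) := [[1, 2], [1, 3]]

def Spec_best_piv_dim (points : List (List Int)) (out : Int) : Prop := out = best_piv_dim_alt points
instance (points : List (List Int)) (out : Int) : Decidable (Spec_best_piv_dim points out) := by unfold Spec_best_piv_dim; infer_instance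

-- ===== CLAIM (what is proved, stated in full; the proofs are below) =====
def Claim_equal_best_piv_dim : Prop := ∀ (points : List (List Int)), Dom_best_piv_dim points → Pre_best_piv_dim points → Spec_best_piv_dim points (best_piv_dim points)

-- ===== LEMMAS AND PROOFS =====

-- number of value changes in a scan with a running "previous" value
def runCountN (prev : Option Int) : List Int → Nat
  | [] => 0
  | v :: t => (if some v ≠ prev then 1 else 0) + runCountN (some v) t

-- B's fold computes runCountN
theorem fold_runCount (l : List Int) (c : Int) (prev : Option Int) :
    (l.foldl (fun (st : Int × Option Int) v =>
        (if some v ≠ st.2 then st.1 + 1 else st.1, some v)) (c, prev)).1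
      = c + (runCountN prev l : Int) := by
  induction l generalizing c prev with
  | nil => simp [runCountN]
  | cons v t ih =>
    simp only [List.foldl_cons, runCountN]
    by_cases h : some v ≠ prev
    · rw [if_pos h, if_pos h, ih]; push_cast; ring
    · rw [if_neg h, if_neg h, ih]; push_cast; ring

-- on a ≤-sorted list all of whose elements are at least p, the change count from previous
-- value p is the number of distinct values other than p
theorem runCount_some (p : Int) (l : List Int) (hl : l.Pairwise (· ≤ ·))
    (hp : ∀ x ∈ l, p ≤ x) : runCountN (some p) l = (l.toFinset.erase p).card := by
  induction l generalizing p with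
  | nil => simp [runCountN]
  | cons v t ih =>
    have hpw : t.Pairwise (· ≤ ·) := (List.pairwise_cons.1 hl).2
    have hvt : ∀ x ∈ t, v ≤ x := (List.pairwise_cons.1 hl).1
    have hins : (insert v t.toFinset).card = (t.toFinset.erase v).card + 1 := by
      by_cases hv : v ∈ t.toFinset
      · rw [Finset.insert_eq_self.mpr hv]; have := Finset.card_erase_add_one hv; omega
      · rw [Finset.card_insert_of_notMem hv, Finset.erase_eq_of_notMem hv]
    simp only [runCountN, List.toFinset_cons]
    by_cases hvp : v = p
    · subst hvp
      rw [if_neg (by simp), Finset.erase_insert_eq_erase, ih v hpw hvt]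
      omega
    · have hlt : p < v := lt_of_le_of_ne (hp v (by simp)) (Ne.symm hvp)
      have hpnot : p ∉ insert v t.toFinset := by
        simp only [Finset.mem_insert, List.mem_toFinset]
        push Not
        exact ⟨Ne.symm hvp, fun hpt => absurd (hvt p hpt) (not_le.2 hlt)⟩
      rw [if_pos (by simpa using hvp), Finset.erase_eq_of_notMem hpnot, ih v hpw hvt]
      omega

-- the change count of a ≤-sorted list is its number of distinct values
theorem runCount_none (l : List Int) (hl : l.Pairwise (· ≤ ·)) :
    runCountN none l = l.toFinset.card := by
  cases l with
  | nil => simp [runCountN]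
  | cons v t =>
    have hins : (insert v t.toFinset).card = (t.toFinset.erase v).card + 1 := by
      by_cases hv : v ∈ t.toFinset
      · rw [Finset.insert_eq_self.mpr hv]; have := Finset.card_erase_add_one hv; omega
      · rw [Finset.card_insert_of_notMem hv, Finset.erase_eq_of_notMem hv]
    simp only [runCountN, List.toFinset_cons]
    rw [if_pos (by simp), runCount_some v t (List.pairwise_cons.1 hl).2 (List.pairwise_cons.1 hl).1]
    omega

-- a set's size is the number of distinct elements of the list it was built from
theorem set_length_eq (col : List Int) :
    (PySem.Set.ofList col).length = col.toFinset.card := by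
  rw [← List.toFinset_card_of_nodup (PySem.Set.nodup_ofList col)]
  congr 1
  apply Finset.ext
  intro x
  simp [PySem.Set.mem_ofList]

-- sort-then-scan distinct counting agrees with set-size distinct counting
theorem distinct_eq (col : List Int) :
    bpd_distinct col = ((PySem.Set.ofList col).length : Int) := by
  unfold bpd_distinct
  rw [fold_runCount, runCount_none _ (by simpa using PySem.List.sorted_pairwise col (fun x => x)),
      List.toFinset_eq_of_perm _ _ (PySem.List.sorted_perm col (fun x => x) false),
      set_length_eq]
  ring

-- A's (best, split) pair fold with split = c best collapses to Python max's first-extremal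
-- Option fold, when the two key functions agree on in-range dimensions
theorem fold_pair_max (c cB : Int → Int) (w : Int) (l : List Int)
    (hmem : ∀ d ∈ l, 0 ≤ d ∧ d < w)
    (hcB : ∀ d, 0 ≤ d → d < w → cB d = c d)
    (b s : Int) (hb : 0 ≤ b) (hbw : b < w) (hs : s = c b) :
    (l.foldl (fun (st : Int × Int) d => if st.2 < c d then (d, c d) else st) (b, s)).1
      = (l.foldl (fun (acc : Option Int) x =>
          match acc with
          | none => some x
          | some m => if cB m < cB x then some x else some m) (some b)).getD 0 := by
  induction l generalizing b s with
  | nil => simp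
  | cons x xs ih =>
    obtain ⟨hx0, hxw⟩ := hmem x (by simp)
    have hx : cB x = c x := hcB x hx0 hxw
    have hbb : cB b = c b := hcB b hb hbw
    simp only [List.foldl_cons, hx, hbb, hs]
    by_cases hlt : c b < c x
    · simp only [hlt, if_true]
      exact ih (fun d hd => hmem d (by simp [hd])) x _ hx0 hxw rfl
    · simp only [hlt, if_false]
      exact ih (fun d hd => hmem d (by simp [hd])) b _ hb hbw rfl

-- Python max(xs, key) IS the first-extremal fold
theorem max?_eq_foldl (xs : List Int) (key : Int → Int) :
    PySem.List.max? xs key = xs.foldl (fun (acc : Option Int) x =>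
      match acc with
      | none => some x
      | some m => if key m < key x then some x else some m) none := by
  unfold PySem.List.max?
  congr 1
  funext acc x
  cases acc <;> rfl

-- both argmax loops over range(width), as one statement about the two key functions
theorem main_aux (c cB : Int → Int) (w : Int)
    (hcB : ∀ d, 0 ≤ d → d < w → cB d = c d) (hc0 : 0 < w → 0 < c 0) :
    ((PySem.List.pyRange 0 w 1).foldl
        (fun (st : Int × Int) d => if st.2 < c d then (d, c d) else st) (0, 0)).1
      = (PySem.List.max? (PySem.List.pyRange 0 w 1) cB).getD 0 := by
  rw [max?_eq_foldl]
  by_cases hpos : 0 < w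
  · rw [PySem.List.pyRange_one_cons hpos]
    simp only [List.foldl_cons]
    rw [if_pos (hc0 hpos)]
    exact fold_pair_max c cB w _
      (fun d hd => by
        obtain ⟨h1, h2⟩ := (PySem.List.mem_pyRange_one).1 hd
        exact ⟨by omega, h2⟩)
      hcB 0 (c 0) le_rfl hpos rfl
  · rw [PySem.List.pyRange_one_eq_nil (by omega)]
    simp

-- set(column 0) of a nonempty point list is nonempty
theorem ofList_length_pos {α : Type} [BEq α] [LawfulBEq α] (x : α) (xs : List α) :
    0 < (PySem.Set.ofList (x :: xs)).length := by
  rw [PySem.Set.ofList_cons]; simp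

-- ===== VERDICT (by name: the statement is the Claim_ definition above) =====
theorem best_piv_dim_spec : Claim_equal_best_piv_dim := by
  intro points _hdom hpre
  obtain ⟨hne, _hw⟩ := hpre
  have hcB : ∀ d, 0 ≤ d → d < ((points.headD []).length : Int) →
      PySem.List.pyGetD ((PySem.List.pyRange 0 ((points.headD []).length : Int) 1).map
        (fun d => bpd_distinct (points.map (fun p => PySem.List.pyGetD p d 0)))) d 0
      = ((PySem.Set.ofList (points.map (fun p => PySem.List.pyGetD p d 0))).length : Int) := by
    intro d h0 hdw
    rw [PySem.List.pyGetD_map_pyRange_of_nonneg _ _ d 0 h0 hdw, distinct_eq]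
  have hc0 : 0 < ((points.headD []).length : Int) →
      0 < ((PySem.Set.ofList (points.map (fun p => PySem.List.pyGetD p 0 0))).length : Int) := by
    intro _
    obtain ⟨q, qs, rfl⟩ := List.exists_cons_of_ne_nil hne
    simpa using ofList_length_pos (PySem.List.pyGetD q 0 0)
      (qs.map fun p => PySem.List.pyGetD p 0 0)
  simp only [Spec_best_piv_dim, best_piv_dim, best_piv_dim_alt]
  exact main_aux
    (fun d => ((PySem.Set.ofList (points.map (fun p => PySem.List.pyGetD p d 0))).length : Int))
    (fun d => PySem.List.pyGetD ((PySem.List.pyRange 0 ((points.headD []).length : Int) 1).map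
        (fun d => bpd_distinct (points.map (fun p => PySem.List.pyGetD p d 0)))) d 0)
    ((points.headD []).length : Int) hcB hc0
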